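-- pv_equiv track=rewrite | github.com/peterdekker/prediction-histling | dataset/data.py | _calculate_max_len
-- ===== SOURCE A (Python) =====
-- from collections import defaultdict
--
-- def _calculate_max_len(word_lengths, count_threshold):
--     count = defaultdict(int)
--     for word_len in word_lengths:
--         count[word_len] += 1
--     max_len = 0
--     for word_len in count:
--         if word_len > max_len and count[word_len] > count_threshold:
--             max_len = word_len
--     return max_len
-- ===== SOURCE B (Python) =====
-- from itertools import groupby
--
--
-- def _calculate_max_len(word_lengths, count_threshold):
--     max_len = 0
--     for length, grp in groupby(sorted(word_lengths)):
--         if sum(1 for _ in grp) > count_threshold and length > max_len: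
--             max_len = length
--     return max_len
-- ===== Notes on version B (the rewrite author's own statement) =====
-- stated objective: alternative
-- what changed: Replaces the defaultdict frequency table and key-iteration pass with sort-then-groupby: word lengths are sorted, each run of equal lengths yields its count, and one pass over the sorted groups tracks the maximum qualifying length.
import Mathlib
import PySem

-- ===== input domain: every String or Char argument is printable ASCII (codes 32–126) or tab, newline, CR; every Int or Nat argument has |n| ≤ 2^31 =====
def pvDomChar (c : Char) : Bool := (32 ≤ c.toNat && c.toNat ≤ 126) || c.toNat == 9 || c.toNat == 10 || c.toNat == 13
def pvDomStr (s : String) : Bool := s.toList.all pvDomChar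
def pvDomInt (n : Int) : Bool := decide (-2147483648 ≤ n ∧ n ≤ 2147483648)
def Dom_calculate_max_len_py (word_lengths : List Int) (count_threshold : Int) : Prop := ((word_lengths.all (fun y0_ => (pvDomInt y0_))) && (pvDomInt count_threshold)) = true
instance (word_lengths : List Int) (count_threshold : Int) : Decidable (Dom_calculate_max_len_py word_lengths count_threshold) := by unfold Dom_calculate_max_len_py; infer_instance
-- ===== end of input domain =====

-- B replaces A's defaultdict frequency table by sort-then-groupby over runs of equal
-- lengths (objective: alternative algorithm, similar cost).

-- ===== PORT A =====
-- count = defaultdict(int); for word_len in word_lengths: count[word_len] += 1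
-- for word_len in count: if word_len > max_len and count[word_len] > count_threshold: max_len = word_len
def calculate_max_len_py (word_lengths : List Int) (count_threshold : Int) : Int :=
  let count : PySem.Dict Int Int :=
    word_lengths.foldl (fun d x => d.modify x 0 (· + 1)) PySem.Dict.empty
  count.keys.foldl
    (fun max_len word_len =>
      if word_len > max_len ∧ count.getD word_len 0 > count_threshold then word_len else max_len)
    0

-- ===== PORT B =====
-- itertools.groupby over a sorted list (no key): each run of equal adjacent elements
-- yields (value, size of the run).
def pvGroupRuns : List Int → List (Int × Int)
  | [] => []
  | x :: xs =>
    (x, 1 + (xs.takeWhile (· == x)).length) :: pvGroupRuns (xs.dropWhile (· == x))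
termination_by l => l.length
decreasing_by
  simpa using Nat.lt_succ_of_le (List.Sublist.length_le (List.dropWhile_sublist _))

def calculate_max_len_py_alt (word_lengths : List Int) (count_threshold : Int) : Int :=
  (pvGroupRuns (PySem.List.sorted word_lengths (fun x => x))).foldl
    (fun max_len p =>
      if p.2 > count_threshold ∧ p.1 > max_len then p.1 else max_len)
    0

-- ===== PRECONDITION & SPEC =====
def Spec_calculate_max_len_py (word_lengths : List Int) (count_threshold : Int) (out : Int) : Prop := out = calculate_max_len_py_alt word_lengths count_threshold
instance (word_lengths : List Int) (count_threshold : Int) (out : Int) : Decidable (Spec_calculate_max_len_py word_lengths count_threshold out) := by unfold Spec_calculate_max_len_py; infer_instance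

-- ===== CLAIM (what is proved, stated in full; the proofs are below) =====
def Claim_equal_calculate_max_len_py : Prop := ∀ (word_lengths : List Int) (count_threshold : Int), Dom_calculate_max_len_py word_lengths count_threshold → Spec_calculate_max_len_py word_lengths count_threshold (calculate_max_len_py word_lengths count_threshold)

-- ===== LEMMAS AND PROOFS =====

-- On a ≤-sorted list, pvGroupRuns produces nodup first components that enumerate the
-- members, and each second component is the count of its first component in the list.
theorem pvGroupRuns_spec (s : List Int) (h : s.Pairwise (· ≤ ·)) :
    ((pvGroupRuns s).map (·.1)).Nodup ∧
    (∀ k, k ∈ (pvGroupRuns s).map (·.1) ↔ k ∈ s) ∧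
    (∀ p ∈ pvGroupRuns s, p.2 = (s.count p.1 : Int)) := by
  induction s using pvGroupRuns.induct with
  | case1 => simp [pvGroupRuns]
  | case2 x xs ih =>
    have hxs : ∀ y ∈ xs, x ≤ y := fun y hy => List.rel_of_pairwise_cons h hy
    have hdr_sub : (xs.dropWhile (· == x)).Sublist xs := List.dropWhile_sublist _
    have hdr_sorted : (xs.dropWhile (· == x)).Pairwise (· ≤ ·) :=
      (List.Pairwise.sublist hdr_sub (List.Pairwise.of_cons h))
    -- every element of the dropWhile tail is strictly greater than x
    have hdr_gt : ∀ y ∈ xs.dropWhile (· == x), x < y := by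
      intro y hy
      rcases hd : xs.dropWhile (· == x) with _ | ⟨z, w⟩
      · simp [hd] at hy
      · have hz_ne : (z == x) = false := by
          have := List.head_dropWhile_not (· == x) (l := xs) (by simp [hd])
          simpa [hd] using this
        have hz_ne' : z ≠ x := by simpa using hz_ne
        have hz_mem : z ∈ xs := hdr_sub.mem (by simp [hd])
        have hz_gt : x < z := lt_of_le_of_ne (hxs z hz_mem) (Ne.symm hz_ne')
        rw [hd] at hy
        rcases List.mem_cons.mp hy with rfl | hy
        · exact hz_gt
        · have hzw : z ≤ y := by
            have hps := hdr_sorted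
            rw [hd] at hps
            exact List.rel_of_pairwise_cons hps hy
          exact lt_of_lt_of_le hz_gt hzw
    obtain ⟨ihnd, ihmem, ihcnt⟩ := ih hdr_sorted
    have htw : ∀ y ∈ xs.takeWhile (· == x), y = x := by
      intro y hy; simpa using List.mem_takeWhile_imp hy
    have hsplit : xs.takeWhile (· == x) ++ xs.dropWhile (· == x) = xs :=
      List.takeWhile_append_dropWhile
    -- count of x in the takeWhile prefix is its length; x does not occur in the tail
    have hcount_tw : (xs.takeWhile (· == x)).count x = (xs.takeWhile (· == x)).length := by
      apply List.count_eq_length.mpr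
      intro y hy; exact ((htw y hy) ▸ rfl)
    have hcount_dr : (xs.dropWhile (· == x)).count x = 0 := by
      apply List.count_eq_zero.mpr
      intro hx; exact absurd (hdr_gt x hx) (lt_irrefl x)
    refine ⟨?_, ?_, ?_⟩
    · simp only [pvGroupRuns, List.map_cons, List.nodup_cons]
      refine ⟨?_, ihnd⟩
      intro hx
      have := (ihmem x).mp hx
      exact absurd (hdr_gt x this) (lt_irrefl x)
    · intro k
      simp only [pvGroupRuns, List.map_cons, List.mem_cons]
      rw [ihmem k]
      constructor
      · rintro (rfl | hk)
        · exact .inl rfl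
        · exact .inr (hdr_sub.mem hk)
      · rintro (rfl | hk)
        · exact .inl rfl
        · have hk' : k ∈ xs.takeWhile (· == x) ++ xs.dropWhile (· == x) := by rw [← hsplit] at hk; exact hk
          rcases List.mem_append.mp hk' with h1 | h1
          · exact .inl (htw k h1)
          · exact .inr h1
    · intro p hp
      simp only [pvGroupRuns, List.mem_cons] at hp
      rcases hp with rfl | hp
      · simp only [List.count_cons_self]
        have hstep : xs.count x = (xs.takeWhile (· == x)).length := by
          conv_lhs => rw [← hsplit]
          rw [List.count_append, hcount_tw, hcount_dr]
          omega
        omega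
      · have hmem : p.1 ∈ xs.dropWhile (· == x) := by
          have : p.1 ∈ (pvGroupRuns (xs.dropWhile (· == x))).map (·.1) :=
            List.mem_map_of_mem hp
          exact (ihmem p.1).mp this
        have hne : p.1 ≠ x := fun hx => absurd (hx ▸ hdr_gt p.1 hmem) (lt_irrefl _)
        have h1 : (x :: xs).count p.1 = xs.count p.1 := List.count_cons_of_ne (Ne.symm hne)
        have h2 : (xs.takeWhile (· == x)).count p.1 = 0 := by
          apply List.count_eq_zero.mpr
          intro hx; exact hne (htw p.1 hx)
        have h3 : xs.count p.1 = (xs.dropWhile (· == x)).count p.1 := by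
          conv_lhs => rw [← hsplit]
          rw [List.count_append, h2, Nat.zero_add]
        rw [ihcnt p hp, h1, h3]

-- A fold over (value, count) pairs whose counts are determined by the value collapses
-- to a fold over the values.
theorem pvFold_pairs (t : Int) (cnt : Int → Int) :
    ∀ (L : List (Int × Int)) (m : Int), (∀ p ∈ L, p.2 = cnt p.1) →
    L.foldl (fun max_len p => if p.2 > t ∧ p.1 > max_len then p.1 else max_len) m =
    (L.map (·.1)).foldl (fun max_len k => if cnt k > t ∧ k > max_len then k else max_len) m := by
  intro L
  induction L with
  | nil => intro m _; rfl
  | cons p L ih =>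
    intro m hc
    simp only [List.foldl_cons, List.map_cons]
    rw [hc p (by simp)]
    exact ih _ (fun q hq => hc q (List.mem_cons_of_mem p hq))

-- The max-tracking step is insensitive to the order of the scanned values.
theorem pvFold_perm (t : Int) (cnt : Int → Int) (L1 L2 : List Int) (h : L1.Perm L2) (m : Int) :
    L1.foldl (fun max_len k => if k > max_len ∧ cnt k > t then k else max_len) m =
    L2.foldl (fun max_len k => if k > max_len ∧ cnt k > t then k else max_len) m := by
  apply List.Perm.foldl_eq' h
  intro a _ b _ z
  by_cases ha : cnt a > t <;> by_cases hb : cnt b > t <;>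
    simp only [gt_iff_lt] <;> split_ifs <;> omega

-- The two argument orders of the conjunction agree.
theorem pvFold_comm (t : Int) (cnt : Int → Int) (L : List Int) (m : Int) :
    L.foldl (fun max_len k => if cnt k > t ∧ k > max_len then k else max_len) m =
    L.foldl (fun max_len k => if k > max_len ∧ cnt k > t then k else max_len) m := by
  induction L generalizing m with
  | nil => rfl
  | cons k L ih =>
    simp only [List.foldl_cons]
    rw [show (if cnt k > t ∧ k > m then k else m) = (if k > m ∧ cnt k > t then k else m) by
      split_ifs <;> omega]
    exact ih _

-- ===== VERDICT (by name: the statement is the Claim_ definition above) =====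
theorem calculate_max_len_py_spec : Claim_equal_calculate_max_len_py := by
  intro wl t _
  unfold Spec_calculate_max_len_py calculate_max_len_py calculate_max_len_py_alt
  simp only [← PySem.Dict.counter_eq_foldl, PySem.Dict.keys_counter, PySem.Dict.getD_counter]
  have hsorted := PySem.List.sorted_pairwise wl (fun x => x)
  obtain ⟨hnd, hmem, hcnt⟩ := pvGroupRuns_spec _ hsorted
  have hcnt' : ∀ p ∈ pvGroupRuns (PySem.List.sorted wl (fun x => x)),
      p.2 = ((wl.count p.1 : Nat) : Int) := by
    intro p hp
    rw [hcnt p hp, (PySem.List.sorted_perm wl (fun x => x) false).count_eq]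
  rw [pvFold_pairs t (fun k => ((wl.count k : Nat) : Int)) _ 0 hcnt', pvFold_comm]
  have hperm : ((pvGroupRuns (PySem.List.sorted wl (fun x => x))).map (·.1)).Perm
      (PySem.Set.ofList wl) := by
    rw [List.perm_ext_iff_of_nodup hnd (PySem.Set.nodup_ofList wl)]
    intro k
    rw [PySem.Set.mem_ofList, hmem k, PySem.List.mem_sorted]
  exact (pvFold_perm t _ _ _ hperm 0).symm
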